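-- pv_equiv track=rewrite | github.com/nitinog10/JEE-HUB | jee-prep-hub/server/python/evaluate.py | evaluate_mcq
-- ===== SOURCE A (Python) =====
-- def evaluate_mcq(user_answers, correct_answers):
--     """Evaluate MCQ answers with +4/-1 marking scheme"""
--     score = 0
--     correct = 0
--     wrong = 0
--
--     for q_id, user_ans in user_answers.items():
--         if q_id in correct_answers:
--             if user_ans == correct_answers[q_id]:
--                 score += 4
--                 correct += 1
--             elif user_ans is not None:
--                 score -= 1
--                 wrong += 1
--
--     return {"score": score, "correct": correct, "wrong": wrong, "unattempted": len(correct_answers) - correct - wrong}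
-- ===== SOURCE B (Python) =====
-- def evaluate_mcq(user_answers, correct_answers):
--     """Evaluate MCQ answers: two counting passes over the question paper + closed-form arithmetic"""
--     correct = sum(1 for q, a in correct_answers.items() if user_answers.get(q) == a)
--     attempted = sum(1 for q in correct_answers if user_answers.get(q) is not None)
--     wrong = attempted - correct
--     return {"score": 4 * correct - wrong, "correct": correct, "wrong": wrong,
--             "unattempted": len(correct_answers) - attempted}
-- ===== Notes on version B (the rewrite author's own statement) =====
-- stated objective: alternative
-- what changed: B replaces A's single stateful loop over user_answers by two stateless counting passes over correct_answers (correct matches, attempted questions) and derives score, wrong and unattempted by closed-form arithmetic from those two counts and len(correct_answers).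
import Mathlib
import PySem

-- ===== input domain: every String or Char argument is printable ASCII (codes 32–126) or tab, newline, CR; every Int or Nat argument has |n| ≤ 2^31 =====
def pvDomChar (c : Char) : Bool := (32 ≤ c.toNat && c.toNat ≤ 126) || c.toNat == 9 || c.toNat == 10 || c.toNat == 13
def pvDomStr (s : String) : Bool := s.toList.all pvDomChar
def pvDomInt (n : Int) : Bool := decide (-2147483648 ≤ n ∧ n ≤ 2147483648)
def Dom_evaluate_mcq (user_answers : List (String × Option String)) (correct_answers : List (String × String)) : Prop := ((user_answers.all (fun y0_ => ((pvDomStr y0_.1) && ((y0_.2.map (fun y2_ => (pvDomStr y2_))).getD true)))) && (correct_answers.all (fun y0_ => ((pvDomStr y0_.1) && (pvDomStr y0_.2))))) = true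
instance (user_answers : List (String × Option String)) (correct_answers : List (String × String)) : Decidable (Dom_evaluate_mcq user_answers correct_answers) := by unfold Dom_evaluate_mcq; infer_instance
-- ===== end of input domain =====

-- One honest line: B replaces A's stateful loop over user_answers by two stateless counting
-- passes over correct_answers and derives score/wrong/unattempted by arithmetic.

-- ===== PORT A =====
-- loop body of A: state (score, correct, wrong); 'q_id in correct_answers' + 'correct_answers[q_id]'
-- is the single match on get? (none = key absent).
def evaluateA_step (cd : PySem.Dict String String) (st : Int × Int × Int) (p : String × Option String) : Int × Int × Int :=
  match cd.get? p.1 with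
  | none => st
  | some ca =>
      if p.2 == some ca then (st.1 + 4, st.2.1 + 1, st.2.2)
      else if p.2.isSome then (st.1 - 1, st.2.1, st.2.2 + 1)
      else st

def evaluate_mcq (user_answers : List (String × Option String)) (correct_answers : List (String × String)) : List (String × Int) :=
  let cd := PySem.Dict.mk correct_answers
  let st := user_answers.foldl (evaluateA_step cd) (0, 0, 0)
  [("score", st.1), ("correct", st.2.1), ("wrong", st.2.2),
   ("unattempted", (cd.size : Int) - st.2.1 - st.2.2)]

-- ===== PORT B =====
-- user_answers.get(q) yields None both for an absent key and a stored None: (get? …).getD none.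
def evaluate_mcq_alt (user_answers : List (String × Option String)) (correct_answers : List (String × String)) : List (String × Int) :=
  let ud := PySem.Dict.mk user_answers
  let correct : Int := (correct_answers.countP (fun p => (ud.get? p.1).getD none == some p.2) : Int)
  let attempted : Int := (correct_answers.countP (fun p => ((ud.get? p.1).getD none).isSome) : Int)
  let wrong : Int := attempted - correct
  [("score", 4 * correct - wrong), ("correct", correct), ("wrong", wrong),
   ("unattempted", (correct_answers.length : Int) - attempted)]

-- ===== PRECONDITION & SPEC =====
-- Pre_ excludes association lists with duplicate keys: they do not represent any Python dict
-- (dict keys are unique), so no behaviour of A is defined on them.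
def Pre_evaluate_mcq (user_answers : List (String × Option String)) (correct_answers : List (String × String)) : Prop :=
  (user_answers.map Prod.fst).Nodup ∧ (correct_answers.map Prod.fst).Nodup
instance (user_answers : List (String × Option String)) (correct_answers : List (String × String)) : Decidable (Pre_evaluate_mcq user_answers correct_answers) := by unfold Pre_evaluate_mcq; infer_instance

def pvWitness_evaluate_mcq : (List (String × Option String)) × (List (String × String)) :=
  ([("q1", some "A"), ("q2", none), ("q3", some "C")], [("q1", "A"), ("q2", "B"), ("q3", "D"), ("q4", "A")])

def Spec_evaluate_mcq (user_answers : List (String × Option String)) (correct_answers : List (String × String)) (out : List (String × Int)) : Prop := out = evaluate_mcq_alt user_answers correct_answers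
instance (user_answers : List (String × Option String)) (correct_answers : List (String × String)) (out : List (String × Int)) : Decidable (Spec_evaluate_mcq user_answers correct_answers out) := by unfold Spec_evaluate_mcq; infer_instance

-- ===== CLAIM (what is proved, stated in full; the proofs are below) =====
def Claim_equal_evaluate_mcq : Prop := ∀ (user_answers : List (String × Option String)) (correct_answers : List (String × String)), Dom_evaluate_mcq user_answers correct_answers → Pre_evaluate_mcq user_answers correct_answers → Spec_evaluate_mcq user_answers correct_answers (evaluate_mcq user_answers correct_answers)

-- ===== LEMMAS AND PROOFS =====

-- A's loop as three countP's over user_answers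
def predCA (cd : PySem.Dict String String) (p : String × Option String) : Bool :=
  ((cd.get? p.1).elim false (fun ca => p.2 == some ca))
def predWA (cd : PySem.Dict String String) (p : String × Option String) : Bool :=
  ((cd.get? p.1).elim false (fun ca => p.2.isSome && !(p.2 == some ca)))

lemma foldA_countP (cd : PySem.Dict String String) :
    ∀ (l : List (String × Option String)) (s c w : Int),
    l.foldl (evaluateA_step cd) (s, c, w)
      = (s + 4 * l.countP (predCA cd) - l.countP (predWA cd),
         c + l.countP (predCA cd), w + l.countP (predWA cd)) := by
  intro l
  induction l with
  | nil => intro s c w; simp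
  | cons p t ih =>
      intro s c w
      rcases h : cd.get? p.1 with _ | ca
      · simp [List.foldl_cons, evaluateA_step, predCA, predWA, h, ih]
      · by_cases hc : p.2 == some ca
        · simp [List.foldl_cons, evaluateA_step, predCA, predWA, h, hc, ih, Prod.ext_iff]
          all_goals omega
        · by_cases hs : p.2.isSome
          · simp [List.foldl_cons, evaluateA_step, predCA, predWA, h, hc, hs, ih, Prod.ext_iff]
            all_goals omega
          · simp [List.foldl_cons, evaluateA_step, predCA, predWA, h, hc, hs, ih]

-- B-side predicates over correct_answers (with the user dict)
def predCB (ud : PySem.Dict String (Option String)) (p : String × String) : Bool :=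
  ((ud.get? p.1).elim false (fun ua => ua == some p.2))
def predWB (ud : PySem.Dict String (Option String)) (p : String × String) : Bool :=
  ((ud.get? p.1).elim false (fun ua => ua.isSome && !(ua == some p.2)))

-- B's two count predicates, expressed through predCB/predWB
lemma countB_correct (ud : PySem.Dict String (Option String)) (l : List (String × String)) :
    l.countP (fun p => (ud.get? p.1).getD none == some p.2) = l.countP (predCB ud) := by
  apply List.countP_congr
  intro p _
  rcases h : ud.get? p.1 with _ | ua <;> simp [predCB, h]

lemma countB_attempted (ud : PySem.Dict String (Option String)) (l : List (String × String)) :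
    l.countP (fun p => ((ud.get? p.1).getD none).isSome)
      = l.countP (predCB ud) + l.countP (predWB ud) := by
  induction l with
  | nil => simp
  | cons p t ih =>
      simp only [List.countP_cons]
      rcases h : ud.get? p.1 with _ | (_ | ua)
      · simp [predCB, predWB, h, ih]
      · simp [predCB, predWB, h, ih]
      · by_cases hc : ua = p.2
        · simp [predCB, predWB, h, hc, ih]; omega
        · simp [predCB, predWB, h, hc, ih]; omega

-- key swap lemma: counting matched user entries = counting matched correct entries
lemma countP_update (q : String) (b1 : String → Bool)
    (g : String × String → Bool)
    (hg : ∀ p : String × String, p.1 = q → g p = false) :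
    ∀ (correct : List (String × String)), (correct.map Prod.fst).Nodup →
    correct.countP (fun p => if q == p.1 then b1 p.2 else g p)
      = correct.countP g
        + (match (PySem.Dict.mk correct).get? q with
           | some ca => if b1 ca then 1 else 0
           | none => 0) := by
  intro correct
  induction correct with
  | nil =>
      intro _; simp [PySem.Dict.get?]
  | cons p t ih =>
      obtain ⟨k, v⟩ := p
      intro hnd
      have hnd' : (t.map Prod.fst).Nodup := (List.nodup_cons.mp hnd).2
      have hq : k ∉ t.map Prod.fst := (List.nodup_cons.mp hnd).1
      rw [PySem.Dict.get?_mk_cons]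
      by_cases he : k = q
      · have hgp : g (k, v) = false := hg (k, v) he
        have htail : t.countP (fun r => if q == r.1 then b1 r.2 else g r) = t.countP g := by
          apply List.countP_congr
          intro r hr
          have hr1 : r.1 ≠ q := by
            intro hrq
            exact hq (he ▸ hrq ▸ List.mem_map_of_mem (f := Prod.fst) hr)
          simp [Ne.symm hr1]
        simp only [List.countP_cons, he, beq_self_eq_true, if_true, htail]
        by_cases hb : b1 v <;> simp [hb, hg (q, v) rfl]
      · have hne : (k == q) = false := by simp [he]
        simp only [List.countP_cons, hne]
        have : (q == k) = false := by simp [Ne.symm he]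
        rw [this]
        simp only [if_false, Bool.false_eq_true]
        rw [ih hnd']
        omega

lemma key_swap (P : Option String → String → Bool) :
    ∀ (user : List (String × Option String)) (correct : List (String × String)),
    (user.map Prod.fst).Nodup → (correct.map Prod.fst).Nodup →
    user.countP (fun p => ((PySem.Dict.mk correct).get? p.1).elim false (fun ca => P p.2 ca))
      = correct.countP (fun p => ((PySem.Dict.mk user).get? p.1).elim false (fun ua => P ua p.2)) := by
  intro user
  induction user with
  | nil =>
      intro correct _ _
      simp [PySem.Dict.get?]
  | cons p t ih =>
      obtain ⟨k, v⟩ := p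
      intro correct hu hc
      have hu' : (t.map Prod.fst).Nodup := (List.nodup_cons.mp hu).2
      have hq : k ∉ t.map Prod.fst := (List.nodup_cons.mp hu).1
      have hnone : (PySem.Dict.mk t).get? k = none := by
        rw [PySem.Dict.get?_eq_none_iff_not_mem_keys]
        simpa using hq
      have hrhs : (correct.countP fun r => ((PySem.Dict.mk ((k, v) :: t)).get? r.1).elim false (fun ua => P ua r.2))
          = correct.countP (fun r => if k == r.1 then (P v r.2) else ((PySem.Dict.mk t).get? r.1).elim false (fun ua => P ua r.2)) := by
        apply List.countP_congr
        intro r _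
        rw [PySem.Dict.get?_mk_cons]
        by_cases he : k = r.1 <;> simp [he]
      rw [hrhs, countP_update k (fun ca => P v ca)
            (fun r => ((PySem.Dict.mk t).get? r.1).elim false (fun ua => P ua r.2))
            (by intro r hr; simp [hr, hnone]) correct hc]
      rw [List.countP_cons]
      rw [ih correct hu' hc]
      rcases h : (PySem.Dict.mk correct).get? k with _ | ca
      · simp
      · by_cases hb : P v ca <;> simp [hb]

-- relate A's predicates over user to the B-side predicates over correct
lemma countCA_eq (user : List (String × Option String)) (correct : List (String × String))
    (hu : (user.map Prod.fst).Nodup) (hc : (correct.map Prod.fst).Nodup) :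
    user.countP (predCA (PySem.Dict.mk correct)) = correct.countP (predCB (PySem.Dict.mk user)) := by
  have := key_swap (fun ua ca => ua == some ca) user correct hu hc
  simpa [predCA, predCB] using this

lemma countWA_eq (user : List (String × Option String)) (correct : List (String × String))
    (hu : (user.map Prod.fst).Nodup) (hc : (correct.map Prod.fst).Nodup) :
    user.countP (predWA (PySem.Dict.mk correct)) = correct.countP (predWB (PySem.Dict.mk user)) := by
  have := key_swap (fun ua ca => ua.isSome && !(ua == some ca)) user correct hu hc
  simpa [predWA, predWB] using this

-- size of a literal dict
lemma size_mk (correct : List (String × String)) : (PySem.Dict.mk correct).size = correct.length := by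
  simp [PySem.Dict.size]

-- ===== VERDICT (by name: the statement is the Claim_ definition above) =====
theorem evaluate_mcq_spec : Claim_equal_evaluate_mcq := by
  intro user correct _ hpre
  obtain ⟨hu, hc⟩ := hpre
  unfold Spec_evaluate_mcq evaluate_mcq evaluate_mcq_alt
  dsimp only
  rw [foldA_countP, countB_correct, countB_attempted]
  have h1 := countCA_eq user correct hu hc
  have h2 := countWA_eq user correct hu hc
  simp only [size_mk, h1, h2]
  simp only [List.cons.injEq, Prod.ext_iff, and_true, true_and]
  push_cast
  constructor
  · omega
  refine ⟨by omega, by omega, by omega⟩
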